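-- pv_equiv track=rewrite | github.com/TexasCountry01/advisor-portal-app | _archived_files/debug_scripts/field_audit_report.py | categorize_fields
-- ===== SOURCE A (Python) =====
-- from collections import defaultdict
--
-- def categorize_fields(fields):
--     categories = defaultdict(list)
--     for field in fields:
--         # Determine section based on prefix
--         if field.startswith('tsp_'):
--             categories['tsp'].append(field)
--         elif field.startswith('fegli_'):
--             categories['fegli'].append(field)
--         elif field.startswith('fehb_'):
--             categories['fehb'].append(field)
--         elif field.startswith('fltcip_'):
--             categories['fltcip'].append(field)
--         elif field.startswith('military_') or field.startswith('reserve_') or field.startswith('academy_') or any(x in field for x in ['active_duty', 'lwop']):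
--             categories['military'].append(field)
--         elif any(x in field for x in ['non_deduction', 'break_', 'part_time', 'special']):
--             categories['special_service'].append(field)
--         elif any(x in field for x in ['retirement_', 'leave_scd', 'sick_leave', 'annual_leave', 'ss_', 'social']):
--             categories['retirement_pay'].append(field)
--         elif any(x in field for x in ['employee_', 'spouse_', 'address', 'city', 'state', 'zip', 'cbpo']):
--             categories['basic_info'].append(field)
--         else:
--             categories['other'].append(field)
--     return categories
-- ===== SOURCE B (Python) =====
-- from collections import defaultdict
--
-- # Category priority table: index = priority (lower wins), matching A's if/elif order.
-- _PRIORITY = ['tsp', 'fegli', 'fehb', 'fltcip', 'military', 'special_service',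
--              'retirement_pay', 'basic_info', 'other']
--
-- # Every individual rule with the rank of its category.
-- _PREFIX_RANK = [('tsp_', 0), ('fegli_', 1), ('fehb_', 2), ('fltcip_', 3),
--                 ('military_', 4), ('reserve_', 4), ('academy_', 4)]
--
-- _SUBSTR_RANK = [('active_duty', 4), ('lwop', 4),
--                 ('non_deduction', 5), ('break_', 5), ('part_time', 5), ('special', 5),
--                 ('retirement_', 6), ('leave_scd', 6), ('sick_leave', 6),
--                 ('annual_leave', 6), ('ss_', 6), ('social', 6),
--                 ('employee_', 7), ('spouse_', 7), ('address', 7), ('city', 7),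
--                 ('state', 7), ('zip', 7), ('cbpo', 7)]
--
-- def _rank(field):
--     # rank = best (minimum) priority over ALL matching rules; 8 = 'other'.
--     ranks = [r for p, r in _PREFIX_RANK if field.startswith(p)]
--     ranks += [r for s, r in _SUBSTR_RANK if s in field]
--     return min(ranks, default=8)
--
-- def categorize_fields(fields):
--     cats = [_PRIORITY[_rank(f)] for f in fields]
--     out = defaultdict(list)
--     # group-by: one filter pass per distinct category, keys in first-occurrence order
--     for c in dict.fromkeys(cats):
--         out[c] = [f for f, k in zip(fields, cats) if k == c]
--     return out
-- ===== Notes on version B (the rewrite author's own statement) =====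
-- stated objective: alternative
-- what changed: Instead of a per-field if/elif first-match walk appending incrementally, B computes each field's category as the minimum priority rank over ALL matching rules from a flat rule table, then builds the result as a group-by: one filtered pass per distinct category, keys in first-occurrence order.
import Mathlib
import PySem

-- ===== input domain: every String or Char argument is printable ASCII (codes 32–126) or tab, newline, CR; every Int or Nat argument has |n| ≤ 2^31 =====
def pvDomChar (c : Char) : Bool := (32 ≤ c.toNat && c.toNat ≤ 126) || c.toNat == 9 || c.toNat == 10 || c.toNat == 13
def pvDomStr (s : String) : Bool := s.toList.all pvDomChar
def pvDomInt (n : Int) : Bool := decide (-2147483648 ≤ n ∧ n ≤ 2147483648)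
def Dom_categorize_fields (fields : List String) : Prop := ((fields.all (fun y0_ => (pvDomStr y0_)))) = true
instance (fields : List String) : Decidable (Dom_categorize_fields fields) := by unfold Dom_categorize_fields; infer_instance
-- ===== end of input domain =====

-- B replaces A's per-field if/elif walk by a rank table (rank = min priority over ALL matching
-- rules) followed by a group-by (one filter pass per distinct category, keys in first-occurrence order).

-- ===== PORT A =====
-- literal port of A: a defaultdict(list) filled by an if/elif chain; returned as its items list
def categorize_fields (fields : List String) : List (String × List String) :=
  (fields.foldl (fun (categories : PySem.Dict String (List String)) field =>
    if PySem.Str.startswith field "tsp_" then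
      categories.modify "tsp" [] (· ++ [field])
    else if PySem.Str.startswith field "fegli_" then
      categories.modify "fegli" [] (· ++ [field])
    else if PySem.Str.startswith field "fehb_" then
      categories.modify "fehb" [] (· ++ [field])
    else if PySem.Str.startswith field "fltcip_" then
      categories.modify "fltcip" [] (· ++ [field])
    else if PySem.Str.startswith field "military_" || PySem.Str.startswith field "reserve_" ||
            PySem.Str.startswith field "academy_" ||
            (["active_duty", "lwop"].any (fun x => PySem.Str.isIn x field)) then
      categories.modify "military" [] (· ++ [field])
    else if ["non_deduction", "break_", "part_time", "special"].any
              (fun x => PySem.Str.isIn x field) then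
      categories.modify "special_service" [] (· ++ [field])
    else if ["retirement_", "leave_scd", "sick_leave", "annual_leave", "ss_", "social"].any
              (fun x => PySem.Str.isIn x field) then
      categories.modify "retirement_pay" [] (· ++ [field])
    else if ["employee_", "spouse_", "address", "city", "state", "zip", "cbpo"].any
              (fun x => PySem.Str.isIn x field) then
      categories.modify "basic_info" [] (· ++ [field])
    else
      categories.modify "other" [] (· ++ [field])) PySem.Dict.empty).items

-- ===== PORT B =====
-- _PRIORITY: index = priority rank of the category
def pvPriority : List String :=
  ["tsp", "fegli", "fehb", "fltcip", "military", "special_service", "retirement_pay", "basic_info", "other"]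

-- _PREFIX_RANK / _SUBSTR_RANK: every individual rule with the rank of its category
def pvPrefixRank : List (String × Nat) :=
  [("tsp_", 0), ("fegli_", 1), ("fehb_", 2), ("fltcip_", 3), ("military_", 4), ("reserve_", 4), ("academy_", 4)]

def pvSubstrRank : List (String × Nat) :=
  [("active_duty", 4), ("lwop", 4),
   ("non_deduction", 5), ("break_", 5), ("part_time", 5), ("special", 5),
   ("retirement_", 6), ("leave_scd", 6), ("sick_leave", 6), ("annual_leave", 6), ("ss_", 6), ("social", 6),
   ("employee_", 7), ("spouse_", 7), ("address", 7), ("city", 7), ("state", 7), ("zip", 7), ("cbpo", 7)]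

-- _rank: min over the ranks of all matching rules, default 8 = 'other'
def pvRank (field : String) : Nat :=
  PySem.List.minD
    (((pvPrefixRank.filter (fun pr => PySem.Str.startswith field pr.1)).map (·.2)) ++
     ((pvSubstrRank.filter (fun sr => PySem.Str.isIn sr.1 field)).map (·.2)))
    (fun r => r) 8

-- _PRIORITY[_rank(f)]; pvRank ≤ 8 < len(_PRIORITY), so the getD default is never reached
def pvCat (field : String) : String := pvPriority.getD (pvRank field) "other"

def categorize_fields_alt (fields : List String) : List (String × List String) :=
  let cats := fields.map pvCat
  -- dict.fromkeys(cats) as ordered dedup is PySem.List.dedup; out[c] = [...] is insert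
  ((PySem.List.dedup cats).foldl
    (fun (out : PySem.Dict String (List String)) c =>
      out.insert c (((fields.zip cats).filter (fun fk => fk.2 == c)).map (·.1)))
    PySem.Dict.empty).items

-- ===== PRECONDITION & SPEC =====
def Spec_categorize_fields (fields : List String) (out : List (String × List String)) : Prop := out = categorize_fields_alt fields
instance (fields : List String) (out : List (String × List String)) : Decidable (Spec_categorize_fields fields out) := by unfold Spec_categorize_fields; infer_instance

-- ===== CLAIM (what is proved, stated in full; the proofs are below) =====
def Claim_equal_categorize_fields : Prop := ∀ (fields : List String), Dom_categorize_fields fields → Spec_categorize_fields fields (categorize_fields fields)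

-- ===== LEMMAS AND PROOFS =====

-- A's if/elif choice, extracted as a function (proof helper only)
def pvChainCat (field : String) : String :=
  if PySem.Str.startswith field "tsp_" then "tsp"
  else if PySem.Str.startswith field "fegli_" then "fegli"
  else if PySem.Str.startswith field "fehb_" then "fehb"
  else if PySem.Str.startswith field "fltcip_" then "fltcip"
  else if PySem.Str.startswith field "military_" || PySem.Str.startswith field "reserve_" ||
          PySem.Str.startswith field "academy_" ||
          (["active_duty", "lwop"].any (fun x => PySem.Str.isIn x field)) then "military"
  else if ["non_deduction", "break_", "part_time", "special"].any
            (fun x => PySem.Str.isIn x field) then "special_service"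
  else if ["retirement_", "leave_scd", "sick_leave", "annual_leave", "ss_", "social"].any
            (fun x => PySem.Str.isIn x field) then "retirement_pay"
  else if ["employee_", "spouse_", "address", "city", "state", "zip", "cbpo"].any
            (fun x => PySem.Str.isIn x field) then "basic_info"
  else "other"

-- minD with identity key picks the (unique) minimum
theorem pv_minD_eq (xs : List Nat) (r : Nat) (hmem : r ∈ xs) (hle : ∀ x ∈ xs, r ≤ x) :
    PySem.List.minD xs (fun x => x) 8 = r := by
  cases h : PySem.List.min? xs (fun x => x) with
  | none =>
    rw [(PySem.List.min?_eq_none_iff xs (fun x => x)).mp h] at hmem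
    simp at hmem
  | some m =>
    have h1 : m ≤ r := PySem.List.min?_isMin h r hmem
    have h2 : r ≤ m := hle m (PySem.List.min?_mem h)
    have hd : PySem.List.minD xs (fun x => x) 8 = m := by
      rw [show PySem.List.minD xs (fun x => x) 8 = (PySem.List.min? xs (fun x => x)).getD 8 from rfl, h]
      rfl
    omega

-- B's rank equals the position of A's chain choice
theorem pvRank_eq_chain (f : String) :
    pvRank f =
      (if PySem.Str.startswith f "tsp_" then 0
       else if PySem.Str.startswith f "fegli_" then 1
       else if PySem.Str.startswith f "fehb_" then 2
       else if PySem.Str.startswith f "fltcip_" then 3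
       else if PySem.Str.startswith f "military_" || PySem.Str.startswith f "reserve_" ||
               PySem.Str.startswith f "academy_" ||
               (["active_duty", "lwop"].any (fun x => PySem.Str.isIn x f)) then 4
       else if ["non_deduction", "break_", "part_time", "special"].any
                 (fun x => PySem.Str.isIn x f) then 5
       else if ["retirement_", "leave_scd", "sick_leave", "annual_leave", "ss_", "social"].any
                 (fun x => PySem.Str.isIn x f) then 6
       else if ["employee_", "spouse_", "address", "city", "state", "zip", "cbpo"].any
                 (fun x => PySem.Str.isIn x f) then 7
       else 8 : Nat) := by
  unfold pvRank
  split_ifs with h1 h2 h3 h4 h5 h6 h7 h8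
  · apply pv_minD_eq
    · simp at h1
      simp [pvPrefixRank, pvSubstrRank, List.mem_filter]
      tauto
    · intro x hx
      simp [pvPrefixRank, pvSubstrRank, List.mem_filter] at hx
      repeat
        first
        | omega
        | (rcases hx with ⟨-, hx⟩)
        | (rcases hx with hx | hx)
  · apply pv_minD_eq
    · simp at h2
      simp [pvPrefixRank, pvSubstrRank, List.mem_filter]
      tauto
    · intro x hx
      simp at h1
      simp [pvPrefixRank, pvSubstrRank, List.mem_filter, h1] at hx
      repeat
        first
        | omega
        | (rcases hx with ⟨-, hx⟩)
        | (rcases hx with hx | hx)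
  · apply pv_minD_eq
    · simp at h3
      simp [pvPrefixRank, pvSubstrRank, List.mem_filter]
      tauto
    · intro x hx
      simp at h1 h2
      simp [pvPrefixRank, pvSubstrRank, List.mem_filter, h1, h2] at hx
      repeat
        first
        | omega
        | (rcases hx with ⟨-, hx⟩)
        | (rcases hx with hx | hx)
  · apply pv_minD_eq
    · simp at h4
      simp [pvPrefixRank, pvSubstrRank, List.mem_filter]
      tauto
    · intro x hx
      simp at h1 h2 h3
      simp [pvPrefixRank, pvSubstrRank, List.mem_filter, h1, h2, h3] at hx
      repeat
        first
        | omega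
        | (rcases hx with ⟨-, hx⟩)
        | (rcases hx with hx | hx)
  · apply pv_minD_eq
    · simp at h5
      simp [pvPrefixRank, pvSubstrRank, List.mem_filter]
      tauto
    · intro x hx
      simp at h1 h2 h3 h4
      simp [pvPrefixRank, pvSubstrRank, List.mem_filter, h1, h2, h3, h4] at hx
      repeat
        first
        | omega
        | (rcases hx with ⟨-, hx⟩)
        | (rcases hx with hx | hx)
  · apply pv_minD_eq
    · simp at h6
      simp [pvPrefixRank, pvSubstrRank, List.mem_filter]
      tauto
    · intro x hx
      simp at h1 h2 h3 h4 h5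
      simp [pvPrefixRank, pvSubstrRank, List.mem_filter, h1, h2, h3, h4, h5] at hx
      repeat
        first
        | omega
        | (rcases hx with ⟨-, hx⟩)
        | (rcases hx with hx | hx)
  · apply pv_minD_eq
    · simp at h7
      simp [pvPrefixRank, pvSubstrRank, List.mem_filter]
      tauto
    · intro x hx
      simp at h1 h2 h3 h4 h5 h6
      simp [pvPrefixRank, pvSubstrRank, List.mem_filter, h1, h2, h3, h4, h5, h6] at hx
      repeat
        first
        | omega
        | (rcases hx with ⟨-, hx⟩)
        | (rcases hx with hx | hx)
  · apply pv_minD_eq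
    · simp at h8
      simp [pvPrefixRank, pvSubstrRank, List.mem_filter]
      tauto
    · intro x hx
      simp at h1 h2 h3 h4 h5 h6 h7
      simp [pvPrefixRank, pvSubstrRank, List.mem_filter, h1, h2, h3, h4, h5, h6, h7] at hx
      repeat
        first
        | omega
        | (rcases hx with ⟨-, hx⟩)
        | (rcases hx with hx | hx)
  · simp at h1 h2 h3 h4 h5 h6 h7 h8
    have hnil : (((pvPrefixRank.filter (fun pr => PySem.Str.startswith f pr.1)).map (·.2)) ++
     ((pvSubstrRank.filter (fun sr => PySem.Str.isIn sr.1 f)).map (·.2))) = [] := by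
      simp [pvPrefixRank, pvSubstrRank, List.filter_eq_nil_iff]
      tauto
    rw [hnil]
    rfl

theorem pvCat_eq_chain (f : String) : pvCat f = pvChainCat f := by
  unfold pvCat pvChainCat
  rw [pvRank_eq_chain]
  split_ifs <;> rfl

-- A's per-field step is a modify at pvCat
theorem pv_step_eq (categories : PySem.Dict String (List String)) (field : String) :
    (if PySem.Str.startswith field "tsp_" then
      categories.modify "tsp" [] (· ++ [field])
    else if PySem.Str.startswith field "fegli_" then
      categories.modify "fegli" [] (· ++ [field])
    else if PySem.Str.startswith field "fehb_" then
      categories.modify "fehb" [] (· ++ [field])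
    else if PySem.Str.startswith field "fltcip_" then
      categories.modify "fltcip" [] (· ++ [field])
    else if PySem.Str.startswith field "military_" || PySem.Str.startswith field "reserve_" ||
            PySem.Str.startswith field "academy_" ||
            (["active_duty", "lwop"].any (fun x => PySem.Str.isIn x field)) then
      categories.modify "military" [] (· ++ [field])
    else if ["non_deduction", "break_", "part_time", "special"].any
              (fun x => PySem.Str.isIn x field) then
      categories.modify "special_service" [] (· ++ [field])
    else if ["retirement_", "leave_scd", "sick_leave", "annual_leave", "ss_", "social"].any
              (fun x => PySem.Str.isIn x field) then
      categories.modify "retirement_pay" [] (· ++ [field])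
    else if ["employee_", "spouse_", "address", "city", "state", "zip", "cbpo"].any
              (fun x => PySem.Str.isIn x field) then
      categories.modify "basic_info" [] (· ++ [field])
    else
      categories.modify "other" [] (· ++ [field])) =
    categories.modify (pvCat field) [] (· ++ [field]) := by
  rw [pvCat_eq_chain]
  unfold pvChainCat
  split_ifs <;> rfl

-- zip with the mapped list is a map of pairs
theorem pv_zip_map_self {α β : Type} (l : List α) (g : α → β) :
    l.zip (l.map g) = l.map (fun x => (x, g x)) := by
  induction l with
  | nil => rfl
  | cons x t ih => simp [ih]

-- A's loop, rewritten as a fold over (category, field) pairs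
theorem pv_fold_pairs (fields : List String) :
    fields.foldl (fun (d : PySem.Dict String (List String)) field => d.modify (pvCat field) [] (· ++ [field])) PySem.Dict.empty
      = (fields.map (fun f => (pvCat f, f))).foldl (fun d p => d.modify p.1 [] (· ++ [p.2])) PySem.Dict.empty := by
  rw [List.foldl_map]

-- ===== VERDICT =====
theorem categorize_fields_spec : Claim_equal_categorize_fields := by
  intro fields _
  unfold Spec_categorize_fields categorize_fields categorize_fields_alt
  simp only [pv_step_eq]
  -- A's dict, as a fold over (category, field) pairs
  rw [pv_fold_pairs]
  -- its keys are the distinct categories in first-occurrence order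
  have hkeys : ((fields.map (fun f => (pvCat f, f))).foldl
      (fun (d : PySem.Dict String (List String)) p => d.modify p.1 [] (· ++ [p.2])) PySem.Dict.empty).keys
      = PySem.Set.ofList (fields.map pvCat) := by
    rw [PySem.Dict.keys_foldl_modify_key]
    simp [List.map_map, PySem.Set.update_nil_left, Function.comp_def]
  have hnd : ((fields.map (fun f => (pvCat f, f))).foldl
      (fun (d : PySem.Dict String (List String)) p => d.modify p.1 [] (· ++ [p.2])) PySem.Dict.empty).keys.Nodup := by
    rw [hkeys]; exact PySem.Set.nodup_ofList _
  rw [PySem.Dict.items_eq_map_keys _ hnd [], hkeys]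
  -- B's dict: inserts over fresh distinct keys
  rw [PySem.Dict.items_foldl_insert_fresh (PySem.List.dedup (fields.map pvCat)) (fun c => c)
        (fun c => ((fields.zip (fields.map pvCat)).filter (fun fk => fk.2 == c)).map (·.1))
        PySem.Dict.empty (fun a _ => rfl)
        (by simp [PySem.List.dedup_eq_ofList, PySem.Set.nodup_ofList])]
  rw [PySem.List.dedup_eq_ofList]
  -- componentwise: both groups are fields.filter (pvCat · == c)
  apply List.map_congr_left
  intro c _
  rw [PySem.Dict.getD_foldl_modify_append, pv_zip_map_self]
  simp [PySem.Dict.getD_empty, List.filter_map, List.map_map, Function.comp_def]
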